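-- pv_equiv track=rewrite | github.com/zonca/toast | toast/dist.py | distribute_uniform
-- ===== SOURCE A (Python) =====
-- def distribute_uniform(totalsize, groups):
--     """
--     Uniformly distribute items between groups.
--
--     Given some number of items and some number of groups,
--     distribute the items between groups in the most Uniform
--     way possible.
--
--     Args:
--         totalsize (int): The total number of items.
--         groups (int): The number of groups.
--
--     Returns:
--         list of tuples: there is one tuple per group.  The
--         first element of the tuple is the first item
--         assigned to the group, and the second element is
--         the number of items assigned to the group.
--     """
--     ret = []
--     for i in range(groups):
--         myn = totalsize // groups
--         off = 0
--         leftover = totalsize % groups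
--         if ( i < leftover ):
--             myn = myn + 1
--             off = i * myn
--         else:
--             off = ((myn + 1) * leftover) + (myn * (i - leftover))
--         ret.append( (off, myn) )
--     return ret
-- ===== SOURCE B (Python) =====
-- def distribute_uniform(totalsize, groups):
--     ret = []
--     off = 0
--     for i in range(groups):
--         myn = totalsize // groups + (1 if i < totalsize % groups else 0)
--         ret.append((off, myn))
--         off += myn
--     return ret
-- ===== Notes on version B (the rewrite author's own statement) =====
-- stated objective: simpler
-- what changed: Replaces A's per-group closed-form offset formula (branching on i < leftover with two different offset expressions) by a single running offset accumulator that adds each group's count as it goes.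
import Mathlib
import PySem

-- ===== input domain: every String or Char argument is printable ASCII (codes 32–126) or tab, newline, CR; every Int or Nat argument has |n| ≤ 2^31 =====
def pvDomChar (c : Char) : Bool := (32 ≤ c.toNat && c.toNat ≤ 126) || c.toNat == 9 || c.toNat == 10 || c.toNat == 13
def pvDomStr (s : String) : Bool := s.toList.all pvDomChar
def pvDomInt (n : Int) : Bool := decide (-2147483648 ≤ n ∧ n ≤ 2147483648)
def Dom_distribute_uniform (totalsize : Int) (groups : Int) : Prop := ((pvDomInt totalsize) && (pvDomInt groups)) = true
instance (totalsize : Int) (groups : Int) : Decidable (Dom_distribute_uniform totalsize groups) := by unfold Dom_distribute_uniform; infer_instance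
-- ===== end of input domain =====

-- B replaces A's per-group closed-form offset formula by a running offset accumulator (simpler).


-- ===== PORT A =====
-- literal port of A: for each i in range(groups), compute the count and a closed-form offset
def distribute_uniform (totalsize : Int) (groups : Int) : List (Int × Int) :=
  (PySem.List.pyRange 0 groups 1).foldl
    (fun ret i =>
      let myn := PySem.Int.floordiv totalsize groups
      let leftover := PySem.Int.mod totalsize groups
      if i < leftover then
        let myn := myn + 1
        let off := i * myn
        ret ++ [(off, myn)]
      else
        let off := ((myn + 1) * leftover) + (myn * (i - leftover))
        ret ++ [(off, myn)]) []

-- ===== PORT B =====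
-- literal port of B: running offset accumulator carried through the fold
def distribute_uniform_alt (totalsize : Int) (groups : Int) : List (Int × Int) :=
  ((PySem.List.pyRange 0 groups 1).foldl
    (fun (s : List (Int × Int) × Int) i =>
      let myn := PySem.Int.floordiv totalsize groups +
        (if i < PySem.Int.mod totalsize groups then 1 else 0)
      (s.1 ++ [(s.2, myn)], s.2 + myn))
    ([], 0)).1

-- ===== PRECONDITION & SPEC =====
def Spec_distribute_uniform (totalsize : Int) (groups : Int) (out : List (Int × Int)) : Prop := out = distribute_uniform_alt totalsize groups
instance (totalsize : Int) (groups : Int) (out : List (Int × Int)) : Decidable (Spec_distribute_uniform totalsize groups out) := by unfold Spec_distribute_uniform; infer_instance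

-- ===== CLAIM (what is proved, stated in full; the proofs are below) =====
def Claim_equal_distribute_uniform : Prop := ∀ (totalsize : Int) (groups : Int), Dom_distribute_uniform totalsize groups → Spec_distribute_uniform totalsize groups (distribute_uniform totalsize groups)

-- ===== LEMMAS AND PROOFS =====

-- A's closed-form offset at index i (the value 'off' A computes), as a function.
def pvOff (q lv i : Int) : Int :=
  if i < lv then i * (q + 1) else (q + 1) * lv + q * (i - lv)

-- Joint invariant: B's fold state over range(n) is (A's list over range(n), A's closed-form
-- offset at index n) — the running offset equals the sum of the counts handed out so far.
theorem pv_invariant (q lv : Int) (hlv : 0 ≤ lv) (n : Nat) :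
    (PySem.List.pyRange 0 (n : Int) 1).foldl
      (fun (s : List (Int × Int) × Int) i =>
        let myn := q + (if i < lv then 1 else 0)
        (s.1 ++ [(s.2, myn)], s.2 + myn))
      ([], 0)
    = ((PySem.List.pyRange 0 (n : Int) 1).foldl
        (fun ret i =>
          let myn := q
          let leftover := lv
          if i < leftover then
            let myn := myn + 1
            let off := i * myn
            ret ++ [(off, myn)]
          else
            let off := ((myn + 1) * leftover) + (myn * (i - leftover))
            ret ++ [(off, myn)]) [],
       pvOff q lv (n : Int)) := by
  induction n with
  | zero =>
    rw [show ((0:Nat):Int) = 0 by norm_num, PySem.List.pyRange_one_eq_nil le_rfl]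
    simp only [List.foldl_nil, pvOff, Prod.mk.injEq]
    refine ⟨trivial, ?_⟩
    rcases eq_or_lt_of_le hlv with h | h
    · simp [← h]
    · simp [h]
  | succ n ih =>
    have hsplit : PySem.List.pyRange 0 ((n+1 : Nat) : Int) 1
        = PySem.List.pyRange 0 (n : Int) 1 ++ [(n : Int)] := by
      have := PySem.List.pyRange_one_succ_right (a := 0) (b := (n : Int)) (by exact_mod_cast Nat.zero_le n)
      push_cast
      exact this
    rw [hsplit, List.foldl_append, List.foldl_append, ih]
    simp only [List.foldl_cons, List.foldl_nil, Prod.mk.injEq]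
    by_cases hlt : (n : Int) < lv
    · -- group n gets q+1 items
      refine ⟨?_, ?_⟩
      · simp [hlt, pvOff]
      · simp only [pvOff, if_pos hlt]
        push_cast
        by_cases hlt1 : (n : Int) + 1 < lv
        · rw [if_pos hlt1]; ring
        · rw [if_neg hlt1]
          have hr : lv = (n : Int) + 1 := by omega
          rw [hr]; ring
    · -- group n gets q items
      refine ⟨?_, ?_⟩
      · simp [hlt, pvOff]
      · simp only [pvOff, if_neg hlt]
        push_cast
        rw [if_neg (show ¬ (n : Int) + 1 < lv by omega)]
        ring

-- ===== VERDICT (by name: the statement is the Claim_ definition above) =====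
theorem distribute_uniform_spec : Claim_equal_distribute_uniform := by
  intro t g _
  unfold Spec_distribute_uniform distribute_uniform distribute_uniform_alt
  by_cases hg : g ≤ 0
  · rw [PySem.List.pyRange_one_eq_nil (by omega)]
    simp
  · have hg' : 0 < g := by omega
    have hlv : 0 ≤ PySem.Int.mod t g := by
      rw [PySem.Int.mod_eq_emod_of_pos hg']
      exact Int.emod_nonneg t (by omega)
    rw [show PySem.List.pyRange 0 g 1 = PySem.List.pyRange 0 ((g.toNat : Nat) : Int) 1 from by
      congr 1; omega]
    rw [pv_invariant (PySem.Int.floordiv t g) (PySem.Int.mod t g) hlv g.toNat]
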